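-- pv_equiv track=rewrite | github.com/fabianraisch/Adapting_to_Change | src/utils/adaptive_learning/rpr.py | linear_index_to_coord
-- ===== SOURCE A (Python) =====
-- def linear_index_to_coord(
--         index: int,
--         dims: list,
--         ):
--     """
--     Convert a linear index (from flattened dims) to a coordinate in the tensor.
--     """
--     coord = []
--     for dim in reversed(dims):
--         coord.append(index % dim)
--         index //= dim
--     return tuple(reversed(coord))
-- ===== SOURCE B (Python) =====
-- def linear_index_to_coord(index, dims):
--     """Recursive decomposition: go(ds) returns (product of ds, coords for ds),
--     computing each coordinate as (index // product-of-tail) % head."""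
--     def go(ds):
--         if not ds:
--             return 1, ()
--         stride, rest = go(ds[1:])
--         return stride * ds[0], ((index // stride) % ds[0],) + rest
--     return go(list(dims))[1]
-- ===== Notes on version B (the rewrite author's own statement) =====
-- stated objective: alternative
-- what changed: Replaces A's reverse-order modulo-and-floordiv digit-extraction loop with a head-first recursion that returns (product of dims, coords) and computes each coordinate directly as (index // product-of-tail) % head.
-- outside the precondition, e.g. on linear_index_to_coord(0, [2, 0, 3]): A raises ZeroDivisionError, B raises ZeroDivisionError; on linear_index_to_coord(3, [4, -1, -2]): A returns (2, 0, -1), B returns (1, 0, -1)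
import Mathlib
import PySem

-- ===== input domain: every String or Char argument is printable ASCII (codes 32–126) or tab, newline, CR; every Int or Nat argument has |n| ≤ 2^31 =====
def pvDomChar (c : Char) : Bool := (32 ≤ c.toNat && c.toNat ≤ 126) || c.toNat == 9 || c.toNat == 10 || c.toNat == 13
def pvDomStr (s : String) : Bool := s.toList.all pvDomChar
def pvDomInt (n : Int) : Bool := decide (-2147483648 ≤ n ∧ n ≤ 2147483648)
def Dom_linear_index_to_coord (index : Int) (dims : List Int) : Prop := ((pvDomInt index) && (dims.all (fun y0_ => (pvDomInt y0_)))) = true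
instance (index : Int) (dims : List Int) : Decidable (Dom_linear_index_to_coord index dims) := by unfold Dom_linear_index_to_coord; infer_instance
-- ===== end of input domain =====

-- B replaces A's reverse digit-extraction loop with a head-first recursion returning (product, coords) (alternative decomposition, same cost).


-- ===== PORT A =====
def linear_index_to_coord (index : Int) (dims : List Int) : List Int :=
  let st := dims.reverse.foldl
    (fun (st : List Int × Int) dim =>
      (st.1 ++ [PySem.Int.mod st.2 dim], PySem.Int.floordiv st.2 dim))
    (([] : List Int), index)
  st.1.reverse

-- ===== PORT B =====
/-- B's inner `go`: recursion on the dims list, returning (product of ds, coords for ds). -/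
def pvGo (index : Int) : List Int → Int × List Int
  | [] => (1, [])
  | d :: r =>
    let sr := pvGo index r
    (sr.1 * d, PySem.Int.mod (PySem.Int.floordiv index sr.1) d :: sr.2)

def linear_index_to_coord_alt (index : Int) (dims : List Int) : List Int :=
  (pvGo index dims).2

-- ===== PRECONDITION & SPEC =====
-- Pre_ excludes dims containing a zero (both programs raise ZeroDivisionError there) and dims
-- whose non-last entries are not all positive (meaningless as tensor shapes; there A's value is
-- an artefact of nested floor division that no stride formula reproduces). The last dim may be
-- any nonzero integer.
def Pre_linear_index_to_coord (index : Int) (dims : List Int) : Prop :=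
  (∀ d ∈ dims.dropLast, 0 < d) ∧ (∀ d ∈ dims, d ≠ 0)
instance (index : Int) (dims : List Int) : Decidable (Pre_linear_index_to_coord index dims) := by unfold Pre_linear_index_to_coord; infer_instance

def pvWitness_linear_index_to_coord : Int × List Int := (13, [2, 3, 4])

def Spec_linear_index_to_coord (index : Int) (dims : List Int) (out : List Int) : Prop := out = linear_index_to_coord_alt index dims
instance (index : Int) (dims : List Int) (out : List Int) : Decidable (Spec_linear_index_to_coord index dims out) := by unfold Spec_linear_index_to_coord; infer_instance

-- ===== CLAIM (what is proved, stated in full; the proofs are below) =====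
def Claim_equal_linear_index_to_coord : Prop := ∀ (index : Int) (dims : List Int), Dom_linear_index_to_coord index dims → Pre_linear_index_to_coord index dims → Spec_linear_index_to_coord index dims (linear_index_to_coord index dims)

-- ===== LEMMAS AND PROOFS =====

/-- A's loop as structural recursion: successive (mod, floordiv) digits of `i` along `r`. -/
def pvDigits : Int → List Int → List Int
  | _, [] => []
  | i, d :: r => PySem.Int.mod i d :: pvDigits (PySem.Int.floordiv i d) r

/-- Repeated floor division of `i` by the elements of `l`, left to right. -/
def pvDivs (i : Int) (l : List Int) : Int := l.foldl PySem.Int.floordiv i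

theorem pvA_foldl (r : List Int) : ∀ (acc : List Int) (i : Int),
    (r.foldl (fun (st : List Int × Int) dim =>
      (st.1 ++ [PySem.Int.mod st.2 dim], PySem.Int.floordiv st.2 dim)) (acc, i)).1
    = acc ++ pvDigits i r := by
  induction r with
  | nil => intro acc i; simp [pvDigits]
  | cons d r ih => intro acc i; simp [List.foldl, pvDigits, ih]

theorem pvDigits_append (l : List Int) : ∀ (i d : Int),
    pvDigits i (l ++ [d]) = pvDigits i l ++ [PySem.Int.mod (pvDivs i l) d] := by
  induction l with
  | nil => intro i d; simp [pvDigits, pvDivs]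
  | cons a l ih => intro i d; simp [pvDigits, pvDivs, List.foldl, ih, pvDivs]

/-- Python's `(i // a) // d = i // (a * d)` for `d > 0` and any nonzero `a`. -/
theorem pvCollapse (i a d : Int) (ha : a ≠ 0) (hd : 0 < d) :
    PySem.Int.floordiv (PySem.Int.floordiv i a) d = PySem.Int.floordiv i (a * d) := by
  rcases lt_or_gt_of_ne ha with hneg | hpos
  · have had : a * d < 0 := mul_neg_of_neg_of_pos hneg hd
    rw [PySem.Int.floordiv_eq_iff_of_pos hd]
    have h1 := PySem.Int.floordiv_mul_add_mod i (a * d)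
    have h2 := PySem.Int.floordiv_mul_add_mod i a
    obtain ⟨hm1, hm2⟩ := PySem.Int.mod_neg_bounds (a := i) had
    obtain ⟨hm1', hm2'⟩ := PySem.Int.mod_neg_bounds (a := i) hneg
    set q := PySem.Int.floordiv i (a * d) with hq
    set p := PySem.Int.floordiv i a with hp
    set m := PySem.Int.mod i (a * d) with hm
    set m' := PySem.Int.mod i a with hm'
    have key : a * (p - q * d) = m - m' := by nlinarith [h1, h2]
    constructor
    · nlinarith [key]
    · nlinarith [key]
  · have hpd : 0 < a * d := mul_pos hpos hd
    rw [PySem.Int.floordiv_eq_ediv_of_pos hd, PySem.Int.floordiv_eq_ediv_of_pos hpos,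
        PySem.Int.floordiv_eq_ediv_of_pos hpd]
    exact Int.ediv_ediv_of_nonneg (le_of_lt hpos)

/-- Repeated floor division collapses to one division by the product, provided the first
divisor is nonzero and the remaining divisors are positive. -/
theorem pvDivs_eq_prod (l : List Int) : ∀ (i : Int), (∀ x ∈ l, x ≠ 0) →
    (∀ x ∈ l.tail, 0 < x) → pvDivs i l = PySem.Int.floordiv i l.prod := by
  induction l with
  | nil => intro i _ _; simp [pvDivs]
  | cons a t ih =>
    intro i hne htail
    simp only [List.tail_cons] at htail
    have ha : a ≠ 0 := hne a (by simp)
    have htpos : 0 < t.prod := List.prod_pos htail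
    have hne' : ∀ x ∈ t, x ≠ 0 := fun x hx => ne_of_gt (htail x hx)
    have htail' : ∀ x ∈ t.tail, 0 < x := fun x hx => htail x (List.mem_of_mem_tail hx)
    simp only [pvDivs, List.foldl_cons, List.prod_cons]
    rw [show (t.foldl PySem.Int.floordiv (PySem.Int.floordiv i a)) = pvDivs (PySem.Int.floordiv i a) t from rfl,
        ih (PySem.Int.floordiv i a) hne' htail', pvCollapse i a t.prod ha htpos]

theorem pvGo_fst (index : Int) (l : List Int) : (pvGo index l).1 = l.prod := by
  induction l with
  | nil => rfl
  | cons d r ih => simp [pvGo, ih, List.prod_cons, mul_comm]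

theorem pvMain (dims : List Int) : ∀ (i : Int), (∀ d ∈ dims.dropLast, 0 < d) →
    (∀ d ∈ dims, d ≠ 0) → (pvDigits i dims.reverse).reverse = (pvGo i dims).2 := by
  induction dims with
  | nil => intro i _ _; rfl
  | cons d rest ih =>
    intro i hdrop hne
    have hdrop' : ∀ x ∈ rest.dropLast, 0 < x := by
      intro x hx
      apply hdrop
      cases rest with
      | nil => simp at hx
      | cons b t => simpa [List.dropLast] using Or.inr hx
    have hne' : ∀ x ∈ rest, x ≠ 0 := fun x hx => hne x (by simp [hx])
    have hrevne : ∀ x ∈ rest.reverse, x ≠ 0 := fun x hx => hne' x (List.mem_reverse.mp hx)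
    have hrevtail : ∀ x ∈ rest.reverse.tail, 0 < x := by
      intro x hx
      rw [List.tail_reverse] at hx
      exact hdrop' x (List.mem_reverse.mp hx)
    simp only [List.reverse_cons, pvDigits_append, List.reverse_append, List.reverse_cons,
      List.reverse_nil, List.nil_append, List.cons_append, pvGo]
    rw [ih i hdrop' hne', pvDivs_eq_prod rest.reverse i hrevne hrevtail,
        List.prod_reverse, pvGo_fst]

-- ===== VERDICT (by name: the statement is the Claim_ definition above) =====
theorem linear_index_to_coord_spec : Claim_equal_linear_index_to_coord := by
  intro index dims _ hpre
  obtain ⟨hdrop, hne⟩ := hpre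
  unfold Spec_linear_index_to_coord linear_index_to_coord linear_index_to_coord_alt
  simp only [pvA_foldl, List.nil_append]
  exact pvMain dims index hdrop hne
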